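-- pv_equiv track=rewrite | github.com/raghavendrahyd/leetcode_n_codesignal | leetcode_n_codesignal/24_minesweeper.py | solution
-- ===== SOURCE A (Python) =====
-- def solution(matrix):
--     rowCount = len(matrix)
--     colCount = len(matrix[0])
--
--     res = {}
--     for i in range(rowCount):
--         for j in range(colCount):
--             lbound_r = max(i - 1, 0)
--             ubound_r = min(i + 1, rowCount)
--             lbound_c = max(j - 1, 0)
--             ubound_c = min(j + 1, colCount)
--
--             tmp = [
--                 l
--                 for p in matrix[lbound_r : ubound_r + 1]
--                 for l in p[lbound_c : ubound_c + 1]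
--             ]
--             if (i) in res.keys():
--                 res[i].append(sum(tmp) - matrix[i][j])
--             else:
--                 res[i] = [sum(tmp) - matrix[i][j]]
--     return list(res.values())
-- ===== SOURCE B (Python) =====
-- def solution(matrix):
--     rowCount = len(matrix)
--     colCount = len(matrix[0])
--     if colCount == 0:
--         return []
--     # per-row prefix sums: pref[r][k] = sum of matrix[r][:k]
--     pref = []
--     for row in matrix:
--         p = [0]
--         acc = 0
--         for x in row:
--             acc += x
--             p.append(acc)
--         pref.append(p)
--
--     def rowslice(r, a, b):
--         p = pref[r]
--         n = len(p) - 1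
--         return p[min(b, n)] - p[min(a, n)]
--
--     res = []
--     for i in range(rowCount):
--         out_row = []
--         for j in range(colCount):
--             a = max(j - 1, 0)
--             b = min(j + 1, colCount) + 1
--             s = 0
--             for r in range(max(i - 1, 0), min(i + 2, rowCount)):
--                 s += rowslice(r, a, b)
--             out_row.append(s - matrix[i][j])
--         res.append(out_row)
--     return res
-- ===== Notes on version B (the rewrite author's own statement) =====
-- stated objective: alternative
-- what changed: B precomputes per-row prefix sums in one pass and computes each cell's clamped 3x3 window as prefix differences, building the output with plain nested list loops instead of A's per-cell list slicing/flattening and dict-of-rows accumulation.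
import Mathlib
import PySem

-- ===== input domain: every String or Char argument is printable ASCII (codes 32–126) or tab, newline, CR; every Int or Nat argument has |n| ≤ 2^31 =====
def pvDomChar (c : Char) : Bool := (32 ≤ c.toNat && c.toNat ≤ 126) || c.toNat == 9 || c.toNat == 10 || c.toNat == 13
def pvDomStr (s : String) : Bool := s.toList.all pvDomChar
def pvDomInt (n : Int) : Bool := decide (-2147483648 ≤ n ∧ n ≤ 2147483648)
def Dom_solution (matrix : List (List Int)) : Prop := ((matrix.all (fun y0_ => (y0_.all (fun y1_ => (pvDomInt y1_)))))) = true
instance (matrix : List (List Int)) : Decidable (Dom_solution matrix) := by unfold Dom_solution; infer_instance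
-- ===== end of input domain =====

-- B replaces A's per-cell slice/flatten window sum and dict-of-rows accumulation by per-row
-- prefix sums queried with clamped prefix differences (objective: alternative decomposition).

-- ===== PORT A =====
def solution (matrix : List (List Int)) : List (List Int) :=
  let rowCount : Int := matrix.length
  let colCount : Int := (matrix.headD []).length
  let res : PySem.Dict Int (List Int) :=
    (PySem.List.pyRange 0 rowCount 1).foldl (fun res i =>
      (PySem.List.pyRange 0 colCount 1).foldl (fun res j =>
        let lbound_r := max (i - 1) 0
        let ubound_r := min (i + 1) rowCount
        let lbound_c := max (j - 1) 0
        let ubound_c := min (j + 1) colCount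
        let tmp : List Int :=
          ((PySem.List.slice matrix (some lbound_r) (some (ubound_r + 1))).map
            (fun p => PySem.List.slice p (some lbound_c) (some (ubound_c + 1)))).flatten
        let v := tmp.sum - PySem.List.pyGetD (PySem.List.pyGetD matrix i []) j 0
        if res.contains i then res.modify i [] (fun l => l ++ [v])
        else res.insert i [v]) res)
      PySem.Dict.empty
  res.values

-- ===== PORT B =====
-- helper: p = [0]; acc = 0; for x in row: acc += x; p.append(acc)
def prefRow (row : List Int) : List Int :=
  (row.foldl (fun (s : List Int × Int) x => (s.1 ++ [s.2 + x], s.2 + x)) ([0], 0)).1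

-- helper: rowslice(r, a, b) = pref[r][min(b, n)] - pref[r][min(a, n)]
def rowslice (pref : List (List Int)) (r a b : Int) : Int :=
  let p := PySem.List.pyGetD pref r []
  let n : Int := (p.length : Int) - 1
  PySem.List.pyGetD p (min b n) 0 - PySem.List.pyGetD p (min a n) 0

def solution_alt (matrix : List (List Int)) : List (List Int) :=
  let rowCount : Int := matrix.length
  let colCount : Int := (matrix.headD []).length
  if colCount = 0 then []
  else
    let pref : List (List Int) := matrix.foldl (fun pref row => pref ++ [prefRow row]) []
    (PySem.List.pyRange 0 rowCount 1).foldl (fun res i =>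
      res ++ [(PySem.List.pyRange 0 colCount 1).foldl (fun out_row j =>
        let a := max (j - 1) 0
        let b := min (j + 1) colCount + 1
        let s := (PySem.List.pyRange (max (i - 1) 0) (min (i + 2) rowCount) 1).foldl
                   (fun s r => s + rowslice pref r a b) 0
        out_row ++ [s - PySem.List.pyGetD (PySem.List.pyGetD matrix i []) j 0]) []]) []

-- ===== PRECONDITION & SPEC =====
-- Pre_ excludes exactly the inputs where Python A raises: the empty matrix (IndexError on
-- matrix[0]) and ragged matrices with a row shorter than row 0 (IndexError on matrix[i][j]).
def Pre_solution (matrix : List (List Int)) : Prop :=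
  matrix ≠ [] ∧
    ((matrix.headD []).length = 0 ∨ ∀ row ∈ matrix, (matrix.headD []).length ≤ row.length)
instance (matrix : List (List Int)) : Decidable (Pre_solution matrix) := by
  unfold Pre_solution; infer_instance
def pvWitness_solution : List (List Int) := [[1, 2], [3, 4]]
def Spec_solution (matrix : List (List Int)) (out : List (List Int)) : Prop := out = solution_alt matrix
instance (matrix : List (List Int)) (out : List (List Int)) : Decidable (Spec_solution matrix out) := by unfold Spec_solution; infer_instance

-- ===== CLAIM (what is proved, stated in full; the proofs are below) =====
def Claim_equal_solution : Prop := ∀ (matrix : List (List Int)), Dom_solution matrix → Pre_solution matrix → Spec_solution matrix (solution matrix)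

-- ===== LEMMAS AND PROOFS =====

-- A's cell value (the zeta-expanded body of A's inner loop)
def vCell (matrix : List (List Int)) (i j : Int) : Int :=
  (((PySem.List.slice matrix (some (max (i - 1) 0)) (some (min (i + 1) (matrix.length : Int) + 1))).map
      (fun p => PySem.List.slice p (some (max (j - 1) 0)) (some (min (j + 1) ((matrix.headD []).length : Int) + 1)))).flatten).sum
    - PySem.List.pyGetD (PySem.List.pyGetD matrix i []) j 0

lemma inner_true (js : List Int) (i : Int) (f : Int → Int)
    (d : PySem.Dict Int (List Int)) (acc : List Int) :
    js.foldl (fun d j => if d.contains i then d.modify i [] (fun l => l ++ [f j])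
      else d.insert i [f j]) (d.insert i acc) = d.insert i (acc ++ js.map f) := by
  induction js generalizing acc with
  | nil => simp
  | cons x t ih =>
    simp only [List.foldl_cons, PySem.Dict.contains_insert_self, if_pos]
    have hm : (d.insert i acc).modify i [] (fun l => l ++ [f x])
        = d.insert i (acc ++ [f x]) := by
      show (d.insert i acc).insert i (((d.insert i acc).getD i []) ++ [f x]) = _
      rw [PySem.Dict.getD_insert_self, PySem.Dict.insert_insert_self]
    rw [hm, ih]
    simp

lemma inner_fresh (js : List Int) (i : Int) (f : Int → Int)
    (d : PySem.Dict Int (List Int)) (hd : d.contains i = false) (hne : js ≠ []) :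
    js.foldl (fun d j => if d.contains i then d.modify i [] (fun l => l ++ [f j])
      else d.insert i [f j]) d = d.insert i (js.map f) := by
  cases js with
  | nil => exact absurd rfl hne
  | cons x t =>
    simp only [List.foldl_cons, hd, Bool.false_eq_true, if_neg, not_false_iff]
    rw [inner_true t i f d [f x]]
    simp

lemma dict_loop_items (n : Nat) (cc : Int) (hcc : 0 < cc) (f : Int → Int → Int) :
    ((PySem.List.pyRange 0 (n : Int) 1).foldl (fun res i =>
      (PySem.List.pyRange 0 cc 1).foldl (fun res j =>
        if res.contains i then res.modify i [] (fun l => l ++ [f i j])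
        else res.insert i [f i j]) res) PySem.Dict.empty).items
    = (PySem.List.pyRange 0 (n : Int) 1).map (fun i => (i, (PySem.List.pyRange 0 cc 1).map (f i))) := by
  induction n with
  | zero => simp [PySem.List.pyRange_one_eq_nil]; rfl
  | succ m ih =>
    have hcast : ((m + 1 : Nat) : Int) = (m : Int) + 1 := by push_cast; ring
    rw [hcast, PySem.List.pyRange_one_succ_right (by positivity), List.foldl_append, List.map_append]
    simp only [List.foldl_cons, List.foldl_nil]
    have hkeys : ((PySem.List.pyRange 0 (m : Int) 1).foldl (fun res i =>
        (PySem.List.pyRange 0 cc 1).foldl (fun res j =>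
          if res.contains i then res.modify i [] (fun l => l ++ [f i j])
          else res.insert i [f i j]) res) PySem.Dict.empty).keys
        = PySem.List.pyRange 0 (m : Int) 1 := by
      simp only [PySem.Dict.keys]
      rw [ih]; simp [Function.comp_def]
    have hcontains : ((PySem.List.pyRange 0 (m : Int) 1).foldl (fun res i =>
        (PySem.List.pyRange 0 cc 1).foldl (fun res j =>
          if res.contains i then res.modify i [] (fun l => l ++ [f i j])
          else res.insert i [f i j]) res) PySem.Dict.empty).contains (m : Int) = false := by
      rw [PySem.Dict.contains_eq_decide_mem_keys, hkeys]
      simp [PySem.List.mem_pyRange_one]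
    have hne : PySem.List.pyRange 0 cc 1 ≠ [] := by
      rw [PySem.List.pyRange_one_cons (by omega)]; simp
    rw [inner_fresh _ _ _ _ hcontains hne,
      PySem.Dict.items_insert_of_not_contains _ _ hcontains, ih]
    simp

lemma dict_loop (n : Nat) (cc : Int) (hcc : 0 < cc) (f : Int → Int → Int) :
    ((PySem.List.pyRange 0 (n : Int) 1).foldl (fun res i =>
      (PySem.List.pyRange 0 cc 1).foldl (fun res j =>
        if res.contains i then res.modify i [] (fun l => l ++ [f i j])
        else res.insert i [f i j]) res) PySem.Dict.empty).values
    = (PySem.List.pyRange 0 (n : Int) 1).map (fun i => (PySem.List.pyRange 0 cc 1).map (f i)) := by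
  simp only [PySem.Dict.values]
  rw [dict_loop_items n cc hcc f]
  simp [Function.comp_def]

lemma solutionA_zero (matrix : List (List Int)) (h : (matrix.headD []).length = 0) :
    solution matrix = [] := by
  simp only [solution, h]
  rw [PySem.List.pyRange_one_eq_nil (by simp)]
  simp only [List.foldl_nil, PySem.List.foldl_ignore]
  rfl

lemma solutionA_eq (matrix : List (List Int)) (h : (matrix.headD []).length ≠ 0) :
    solution matrix = (PySem.List.pyRange 0 (matrix.length : Int) 1).map (fun i =>
      (PySem.List.pyRange 0 ((matrix.headD []).length : Int) 1).map (fun j => vCell matrix i j)) := by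
  simp only [solution, ← vCell.eq_def]
  rw [dict_loop matrix.length ((matrix.headD []).length : Int)
    (by exact_mod_cast Nat.pos_of_ne_zero h) (fun i j => vCell matrix i j)]

lemma pref_fold (row : List Int) (p0 : List Int) (a0 : Int) :
    row.foldl (fun (s : List Int × Int) x => (s.1 ++ [s.2 + x], s.2 + x)) (p0, a0)
      = (p0 ++ (List.range row.length).map (fun k => a0 + (row.take (k + 1)).sum), a0 + row.sum) := by
  induction row generalizing p0 a0 with
  | nil => simp
  | cons x t ih =>
    simp only [List.foldl_cons, ih]
    rw [Prod.ext_iff]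
    refine ⟨?_, by simp [add_assoc]⟩
    simp only [List.length_cons, List.range_succ_eq_map, List.map_cons, List.map_map]
    simp [Function.comp_def, add_assoc, List.append_assoc]

lemma prefRow_eq (row : List Int) :
    prefRow row = (List.range (row.length + 1)).map (fun k => ((row.take k).sum : Int)) := by
  unfold prefRow
  rw [pref_fold, List.range_succ_eq_map]
  simp [List.map_map, Function.comp_def]

lemma sum_drop_take (row : List Int) (a b : Nat) (h : a ≤ b) :
    (((row.drop a).take (b - a)).sum : Int) = (row.take b).sum - (row.take a).sum := by
  have : row.take b = row.take a ++ (row.drop a).take (b - a) := by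
    rw [← List.take_add]
    congr 1; omega
  rw [this, List.sum_append]; ring

lemma rowslice_eq (matrix : List (List Int)) (r a b : Int)
    (hr : 0 ≤ r) (hr2 : r < (matrix.length : Int)) (ha : 0 ≤ a) (hab : a ≤ b) :
    rowslice (matrix.map prefRow) r a b
      = (PySem.List.slice (PySem.List.pyGetD matrix r []) (some a) (some b)).sum := by
  unfold rowslice
  rw [PySem.List.pyGetD_eq_getElem (matrix.map prefRow) [] hr (by simpa using hr2),
      PySem.List.pyGetD_eq_getElem matrix [] hr hr2]
  simp only [List.getElem_map]
  set row := matrix[r.toNat] with hrow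
  rw [prefRow_eq row]
  have hlen : (((List.range (row.length + 1)).map (fun k => ((row.take k).sum : Int))).length : Int)
      = (row.length : Int) + 1 := by simp
  rw [hlen]
  have hb0 : 0 ≤ b := le_trans ha hab
  have hminb : 0 ≤ min b ((row.length : Int) + 1 - 1) := by omega
  have hmina : 0 ≤ min a ((row.length : Int) + 1 - 1) := by omega
  rw [PySem.List.pyGetD_eq_getElem _ 0 hminb (by simp),
      PySem.List.pyGetD_eq_getElem _ 0 hmina (by simp)]
  simp only [List.getElem_map, List.getElem_range]
  rw [PySem.List.slice_toNat _ ha hb0, sum_drop_take row a.toNat b.toNat (by omega)]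
  have h1 : row.take (min b ((row.length : Int) + 1 - 1)).toNat = row.take b.toNat := by
    rw [List.take_eq_take_iff]; omega
  have h2 : row.take (min a ((row.length : Int) + 1 - 1)).toNat = row.take a.toNat := by
    rw [List.take_eq_take_iff]; omega
  rw [h1, h2]

lemma slice_as_map_range {α : Type} (xs : List α) (a b : Int) (d : α)
    (ha : 0 ≤ a) (hab : a ≤ b) (hb : b ≤ (xs.length : Int)) :
    PySem.List.slice xs (some a) (some b)
      = (PySem.List.pyRange a b 1).map (fun r => PySem.List.pyGetD xs r d) := by
  rw [PySem.List.slice_of_nonneg xs ha (by omega) (by omega) hb, PySem.List.pyRange_one]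
  apply List.ext_getElem
  · simp; omega
  · intro k h1 h2
    simp only [List.getElem_take, List.getElem_drop, List.getElem_map, List.getElem_range]
    have hk : k < (b - a).toNat := by simpa using h2
    rw [PySem.List.pyGetD_eq_getElem xs d (by omega) (by omega)]
    congr 1
    omega

lemma slice_clamp_end {α : Type} (xs : List α) (a b b' : Int)
    (ha : 0 ≤ a) (hb : 0 ≤ b) (hb' : 0 ≤ b')
    (h : min b (xs.length : Int) = min b' (xs.length : Int)) :
    PySem.List.slice xs (some a) (some b) = PySem.List.slice xs (some a) (some b') := by
  rw [PySem.List.slice_toNat xs ha hb, PySem.List.slice_toNat xs ha hb']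
  rw [List.take_eq_take_iff]
  simp only [List.length_drop]
  omega

lemma cell_eq (matrix : List (List Int)) (i j : Int)
    (hi : 0 ≤ i) (hi2 : i < (matrix.length : Int))
    (hj : 0 ≤ j) (hj2 : j < ((matrix.headD []).length : Int)) :
    ((PySem.List.pyRange (max (i - 1) 0) (min (i + 2) (matrix.length : Int)) 1).map
        (fun r => rowslice (matrix.map prefRow) r (max (j - 1) 0)
          (min (j + 1) ((matrix.headD []).length : Int) + 1))).sum
      - PySem.List.pyGetD (PySem.List.pyGetD matrix i []) j 0
      = vCell matrix i j := by
  unfold vCell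
  rw [slice_clamp_end matrix (max (i - 1) 0) (min (i + 1) (matrix.length : Int) + 1)
        (min (i + 2) (matrix.length : Int)) (by omega) (by omega) (by omega) (by omega),
      slice_as_map_range matrix (max (i - 1) 0) (min (i + 2) (matrix.length : Int)) []
        (by omega) (by omega) (by omega),
      List.map_map, List.sum_flatten, List.map_map]
  have hmc : ∀ r ∈ PySem.List.pyRange (max (i - 1) 0) (min (i + 2) (matrix.length : Int)) 1,
      rowslice (matrix.map prefRow) r (max (j - 1) 0) (min (j + 1) ((matrix.headD []).length : Int) + 1)
        = (PySem.List.slice (PySem.List.pyGetD matrix r [])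
            (some (max (j - 1) 0)) (some (min (j + 1) ((matrix.headD []).length : Int) + 1))).sum := by
    intro r hrmem
    rw [PySem.List.mem_pyRange_one] at hrmem
    exact rowslice_eq matrix r _ _ (by omega) (by omega) (by omega) (by omega)
  rw [List.map_congr_left hmc]
  simp [Function.comp_def]

lemma solutionB_eq (matrix : List (List Int)) (h : (matrix.headD []).length ≠ 0) :
    solution_alt matrix = (PySem.List.pyRange 0 (matrix.length : Int) 1).map (fun i =>
      (PySem.List.pyRange 0 ((matrix.headD []).length : Int) 1).map (fun j =>
        ((PySem.List.pyRange (max (i - 1) 0) (min (i + 2) (matrix.length : Int)) 1).map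
          (fun r => rowslice (matrix.map prefRow) r (max (j - 1) 0)
            (min (j + 1) ((matrix.headD []).length : Int) + 1))).sum
        - PySem.List.pyGetD (PySem.List.pyGetD matrix i []) j 0)) := by
  simp only [solution_alt]
  rw [if_neg (by exact_mod_cast h)]
  simp only [PySem.List.foldl_append_singleton_eq_map, List.nil_append,
    PySem.List.foldl_add, zero_add]

-- ===== VERDICT (by name: the statement is the Claim_ definition above) =====
theorem solution_spec : Claim_equal_solution := by
  intro matrix _ _
  unfold Spec_solution
  by_cases h : (matrix.headD []).length = 0
  · have hz : ((matrix.headD []).length : Int) = 0 := by exact_mod_cast h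
    rw [solutionA_zero matrix h]
    simp only [solution_alt]
    rw [if_pos hz]
  · rw [solutionA_eq matrix h, solutionB_eq matrix h]
    refine List.map_congr_left (fun i hi => ?_)
    refine List.map_congr_left (fun j hj => ?_)
    rw [PySem.List.mem_pyRange_one] at hi hj
    exact (cell_eq matrix i j hi.1 hi.2 hj.1 hj.2).symm
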